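-- pv_equiv track=rewrite | github.com/microsoft/muzic | relyme/songmass_en/gen_at/1_Gen_L2M.py | get_pitch_duration_structure
-- ===== SOURCE A (Python) =====
-- def get_pitch_duration_structure(note_seq):
--     seq = []
--
--     #遍历寻找pitch-duration的结构
--     #当有不合法情况出现时，找最后一个pitch和第一个duration，保证其相邻
--     #p1 d1 p2 p3 d2 p4 d3-> p1 d1 p3 d1 p4 d3
--     #p1 d1 p2 d2 d3 p3 d4-> p1 d1 p2 d2 p3 d4
--     #p1 d1 p2 p3 d2 d3 p4 d4 -> p1 d1 p3 d2 p4 d4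
--
--     i = 0
--     while (i<len(note_seq)):
--         if note_seq[i] > 128:
--             #Duration
--             i += 1
--
--         else:
--             #Pitch
--             if i+1>=len(note_seq):
--                 #No Duration Followed
--                 break
--             if note_seq[i+1] <= 128:
--                 #Followed by a pitch
--                 i += 1
--                 continue
--
--
--             #Here trans back to str for bleu calculate
--             pitch = str(note_seq[i])
--             duration = str(note_seq[i+1])
--
--             seq.append(pitch)
--             seq.append(duration)
--             i += 2
--     return seq
-- ===== SOURCE B (Python) =====
-- def get_pitch_duration_structure(note_seq):
--     seq = []
--     pending = None  # last unmatched pitch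
--     for v in note_seq:
--         if v > 128:
--             # duration: emit the pair if a pitch is pending, else skip it
--             if pending is not None:
--                 seq.append(str(pending))
--                 seq.append(str(v))
--                 pending = None
--         else:
--             # pitch: overwrites any previous unmatched pitch
--             pending = v
--     return seq
-- ===== Notes on version B (the rewrite author's own statement) =====
-- stated objective: idiomatic
-- what changed: Replaced the index-based while loop with lookahead (note_seq[i+1]) and a break by a single forward for-each scan that keeps one 'pending' pitch variable, overwriting it on consecutive pitches and emitting a pair when a duration arrives.
import Mathlib
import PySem

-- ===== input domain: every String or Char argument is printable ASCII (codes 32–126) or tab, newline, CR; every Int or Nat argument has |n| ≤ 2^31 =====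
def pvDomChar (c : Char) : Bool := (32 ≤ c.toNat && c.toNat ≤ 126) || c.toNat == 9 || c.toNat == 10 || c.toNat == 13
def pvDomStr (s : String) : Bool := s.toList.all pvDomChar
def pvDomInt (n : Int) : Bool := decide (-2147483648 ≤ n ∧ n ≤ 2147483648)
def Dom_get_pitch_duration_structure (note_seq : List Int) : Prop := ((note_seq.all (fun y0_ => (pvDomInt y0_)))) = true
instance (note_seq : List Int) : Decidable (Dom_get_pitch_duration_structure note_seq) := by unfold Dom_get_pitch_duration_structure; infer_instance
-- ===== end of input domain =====

-- B replaces A's index/lookahead while-loop by a for-each scan with one 'pending' pitch variable (idiomatic; same cost).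


-- ===== PORT A =====
-- A's while loop over index i, transliterated as structural recursion on the suffix note_seq[i:]
-- (the loop advances i by 1 or 2; note_seq[i]/note_seq[i+1] are the first two elements of the suffix).
def pvGoA (l : List Int) (seq : List String) : List String :=
  match l with
  | [] => seq
  | x :: rest =>
    if x > 128 then
      -- Duration: i += 1
      pvGoA rest seq
    else
      -- Pitch
      match rest with
      | [] =>
        -- No Duration Followed: break
        seq
      | y :: rest2 =>
        if y ≤ 128 then
          -- Followed by a pitch: i += 1
          pvGoA (y :: rest2) seq
        else
          -- trans back to str: append pitch, duration; i += 2
          pvGoA rest2 (seq ++ [PySem.Int.toStr x, PySem.Int.toStr y])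

def get_pitch_duration_structure (note_seq : List Int) : List String :=
  pvGoA note_seq []

-- ===== PORT B =====
-- B's for-each scan with a 'pending' unmatched pitch.
def pvGoB (l : List Int) (pending : Option Int) (seq : List String) : List String :=
  match l with
  | [] => seq
  | v :: rest =>
    if v > 128 then
      match pending with
      | some p => pvGoB rest none (seq ++ [PySem.Int.toStr p, PySem.Int.toStr v])
      | none => pvGoB rest none seq
    else
      pvGoB rest (some v) seq

def get_pitch_duration_structure_alt (note_seq : List Int) : List String :=
  pvGoB note_seq none []

-- ===== PRECONDITION & SPEC =====
def Spec_get_pitch_duration_structure (note_seq : List Int) (out : List String) : Prop := out = get_pitch_duration_structure_alt note_seq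
instance (note_seq : List Int) (out : List String) : Decidable (Spec_get_pitch_duration_structure note_seq out) := by unfold Spec_get_pitch_duration_structure; infer_instance

-- ===== CLAIM (what is proved, stated in full; the proofs are below) =====
def Claim_equal_get_pitch_duration_structure : Prop := ∀ (note_seq : List Int), Dom_get_pitch_duration_structure note_seq → Spec_get_pitch_duration_structure note_seq (get_pitch_duration_structure note_seq)

-- ===== LEMMAS AND PROOFS =====

theorem pvGoB_none_cons (v : Int) (rest : List Int) (seq : List String) :
    pvGoB (v :: rest) none seq =
      if v > 128 then pvGoB rest none seq else pvGoB rest (some v) seq := by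
  simp [pvGoB]

theorem pvGoB_some_cons (p v : Int) (rest : List Int) (seq : List String) :
    pvGoB (v :: rest) (some p) seq =
      if v > 128 then pvGoB rest none (seq ++ [PySem.Int.toStr p, PySem.Int.toStr v])
      else pvGoB rest (some v) seq := by
  simp [pvGoB]

-- one-step unfoldings of A's loop
theorem pvGoA_cons1 (x : Int) (seq : List String) :
    pvGoA [x] seq = if x > 128 then pvGoA [] seq else seq := rfl

theorem pvGoA_cons2 (x y : Int) (rest2 : List Int) (seq : List String) :
    pvGoA (x :: y :: rest2) seq =
      if x > 128 then pvGoA (y :: rest2) seq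
      else if y ≤ 128 then pvGoA (y :: rest2) seq
      else pvGoA rest2 (seq ++ [PySem.Int.toStr x, PySem.Int.toStr y]) := rfl

-- main invariant: A's loop on a suffix equals B's scan over it with no pending pitch
theorem pvGoA_eq_pvGoB : ∀ (l : List Int) (seq : List String), pvGoA l seq = pvGoB l none seq
  | [], _ => rfl
  | [x], seq => by
      rw [pvGoA_cons1, pvGoB_none_cons]
      by_cases hx : x > 128
      · rw [if_pos hx, if_pos hx]; rfl
      · rw [if_neg hx, if_neg hx]; rfl
  | x :: y :: rest2, seq => by
      rw [pvGoA_cons2, pvGoB_none_cons]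
      by_cases hx : x > 128
      · rw [if_pos hx, if_pos hx]
        exact pvGoA_eq_pvGoB (y :: rest2) seq
      · rw [if_neg hx, if_neg hx, pvGoB_some_cons]
        by_cases hy : y ≤ 128
        · rw [if_pos hy, if_neg (show ¬ y > 128 by omega)]
          have h := pvGoA_eq_pvGoB (y :: rest2) seq
          rw [pvGoB_none_cons, if_neg (show ¬ y > 128 by omega)] at h
          exact h
        · rw [if_neg hy, if_pos (show y > 128 by omega)]
          exact pvGoA_eq_pvGoB rest2 _
termination_by l _ => l.length

-- ===== VERDICT (by name: the statement is the Claim_ definition above) =====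
theorem get_pitch_duration_structure_spec : Claim_equal_get_pitch_duration_structure := by
  intro note_seq _
  unfold Spec_get_pitch_duration_structure get_pitch_duration_structure get_pitch_duration_structure_alt
  exact pvGoA_eq_pvGoB note_seq []
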